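-- pv_equiv track=rewrite | github.com/danpro3/advent-of-code | 2025/09_red_tiles.py | rectangle_boundary_points
-- ===== SOURCE A (Python) =====
-- def rectangle_boundary_points(A, B):
--     ABxmin, ABxmax = sorted([A[0], B[0]])
--     ABymin, ABymax = sorted([A[1], B[1]])
--     points = set()
--     for x in range(ABxmin, ABxmax + 1):
--         points.add((x, ABymin))
--         points.add((x, ABymax))
--     for y in range(ABymin, ABymax + 1):
--         points.add((ABxmin, y))
--         points.add((ABxmax, y))
--     return sorted(points)
-- ===== SOURCE B (Python) =====
-- def rectangle_boundary_points(A, B):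
--     xmin, xmax = (A[0], B[0]) if A[0] <= B[0] else (B[0], A[0])
--     ymin, ymax = (A[1], B[1]) if A[1] <= B[1] else (B[1], A[1])
--     result = []
--     for x in range(xmin, xmax + 1):
--         if x == xmin or x == xmax:
--             for y in range(ymin, ymax + 1):
--                 result.append((x, y))
--         else:
--             result.append((x, ymin))
--             if ymax != ymin:
--                 result.append((x, ymax))
--     return result
-- ===== Notes on version B (the rewrite author's own statement) =====
-- stated objective: faster
-- what changed: B replaces A's set-then-sort (two insertion loops into a hash set, then sorted) by a single increasing x-sweep that emits each boundary column already in sorted order, with no dedup structure and no final sort.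
import Mathlib
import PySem

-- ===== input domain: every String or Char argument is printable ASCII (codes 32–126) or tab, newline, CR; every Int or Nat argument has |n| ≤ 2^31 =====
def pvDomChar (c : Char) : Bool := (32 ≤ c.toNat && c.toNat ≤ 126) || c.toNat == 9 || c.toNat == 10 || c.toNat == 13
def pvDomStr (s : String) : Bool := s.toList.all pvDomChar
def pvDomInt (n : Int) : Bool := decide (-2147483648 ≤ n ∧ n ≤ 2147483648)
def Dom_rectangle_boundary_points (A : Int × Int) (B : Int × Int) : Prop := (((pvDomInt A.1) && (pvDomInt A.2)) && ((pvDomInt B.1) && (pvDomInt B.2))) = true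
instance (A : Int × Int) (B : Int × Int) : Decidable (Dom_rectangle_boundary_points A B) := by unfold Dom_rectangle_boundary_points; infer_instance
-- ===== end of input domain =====

-- B replaces A's set-then-sort with a single increasing x-sweep that emits the boundary already sorted (alternative decomposition).

-- ===== PORT A =====
-- Python's '<' on int pairs is lexicographic, so sorted(points) is sorted with the Lex key.
def rectangle_boundary_points (A : Int × Int) (B : Int × Int) : List (Int × Int) :=
  match PySem.List.sorted [A.1, B.1] (fun x => x),
        PySem.List.sorted [A.2, B.2] (fun x => x) with
  | [ABxmin, ABxmax], [ABymin, ABymax] =>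
      let points : PySem.Set (Int × Int) :=
        (PySem.List.pyRange ABxmin (ABxmax + 1)).foldl
          (fun s x => PySem.Set.add (PySem.Set.add s (x, ABymin)) (x, ABymax))
          (PySem.Set.empty : PySem.Set (Int × Int))
      let points :=
        (PySem.List.pyRange ABymin (ABymax + 1)).foldl
          (fun s y => PySem.Set.add (PySem.Set.add s (ABxmin, y)) (ABxmax, y)) points
      PySem.List.sorted points (fun p => toLex p)
  | _, _ => []  -- unreachable: sorted of a 2-element list has 2 elements

-- ===== PORT B =====
def rectangle_boundary_points_alt (A : Int × Int) (B : Int × Int) : List (Int × Int) :=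
  let xmin := if A.1 ≤ B.1 then A.1 else B.1
  let xmax := if A.1 ≤ B.1 then B.1 else A.1
  let ymin := if A.2 ≤ B.2 then A.2 else B.2
  let ymax := if A.2 ≤ B.2 then B.2 else A.2
  (PySem.List.pyRange xmin (xmax + 1)).foldl
    (fun result x =>
      if x = xmin ∨ x = xmax then
        (PySem.List.pyRange ymin (ymax + 1)).foldl (fun r y => r ++ [(x, y)]) result
      else
        let r := result ++ [(x, ymin)]
        if ymax ≠ ymin then r ++ [(x, ymax)] else r)
    []

-- ===== PRECONDITION & SPEC =====
def Spec_rectangle_boundary_points (A : Int × Int) (B : Int × Int) (out : List (Int × Int)) : Prop := out = rectangle_boundary_points_alt A B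
instance (A : Int × Int) (B : Int × Int) (out : List (Int × Int)) : Decidable (Spec_rectangle_boundary_points A B out) := by unfold Spec_rectangle_boundary_points; infer_instance

-- ===== CLAIM (what is proved, stated in full; the proofs are below) =====
def Claim_equal_rectangle_boundary_points : Prop := ∀ (A : Int × Int) (B : Int × Int), Dom_rectangle_boundary_points A B → Spec_rectangle_boundary_points A B (rectangle_boundary_points A B)

-- ===== LEMMAS AND PROOFS =====

-- sorted of a two-element Int list
theorem pv_sorted_pair (a b : Int) :
    PySem.List.sorted [a, b] (fun x => x) = [min a b, max a b] := by
  apply PySem.List.sorted_id_eq_of_perm_of_pairwise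
  · rcases le_total a b with h | h
    · simp [min_eq_left h, max_eq_right h]
    · rw [min_eq_right h, max_eq_left h]
      exact List.Perm.swap a b []
  · simp

-- membership in A's add-two-points loop
theorem pv_mem_addloop (l : List Int) (f g : Int → Int × Int)
    (s0 : PySem.Set (Int × Int)) (p : Int × Int) :
    p ∈ l.foldl (fun s x => PySem.Set.add (PySem.Set.add s (f x)) (g x)) s0 ↔
      p ∈ s0 ∨ ∃ x ∈ l, p = f x ∨ p = g x := by
  induction l generalizing s0 with
  | nil => simp
  | cons x t ih =>
      simp only [List.foldl_cons, ih, PySem.Set.mem_add, List.mem_cons]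
      constructor
      · rintro (((h | h) | h) | ⟨y, hy, h⟩)
        · exact Or.inl h
        · exact Or.inr ⟨x, Or.inl rfl, Or.inl h⟩
        · exact Or.inr ⟨x, Or.inl rfl, Or.inr h⟩
        · exact Or.inr ⟨y, Or.inr hy, h⟩
      · rintro (h | ⟨y, hy, h⟩)
        · exact Or.inl (Or.inl (Or.inl h))
        · rcases hy with rfl | hy
          · rcases h with h | h
            · exact Or.inl (Or.inl (Or.inr h))
            · exact Or.inl (Or.inr h)
          · exact Or.inr ⟨y, hy, h⟩

theorem pv_nodup_addloop (l : List Int) (f g : Int → Int × Int)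
    (s0 : PySem.Set (Int × Int)) (h : s0.Nodup) :
    (l.foldl (fun s x => PySem.Set.add (PySem.Set.add s (f x)) (g x)) s0).Nodup := by
  induction l generalizing s0 with
  | nil => exact h
  | cons x t ih => exact ih _ (PySem.Set.nodup_add _ _ (PySem.Set.nodup_add _ _ h))

-- the column of boundary points B emits for a given x (proof-side helper)
def pvCol (xmin xmax ymin ymax x : Int) : List (Int × Int) :=
  if x = xmin ∨ x = xmax then
    (PySem.List.pyRange ymin (ymax + 1)).map (fun y => (x, y))
  else if ymax ≠ ymin then [(x, ymin), (x, ymax)] else [(x, ymin)]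

theorem pv_fst_of_mem_col {xmin xmax ymin ymax x : Int} {p : Int × Int}
    (h : p ∈ pvCol xmin xmax ymin ymax x) : p.1 = x := by
  unfold pvCol at h
  split_ifs at h with h1 h2 <;> simp at h
  · obtain ⟨y, _, rfl⟩ := h; rfl
  · rcases h with rfl | rfl <;> rfl
  · subst h; rfl

theorem pv_flatten_singleton {α β : Type} (l : List α) (f : α → β) :
    (l.map (fun y => [f y])).flatten = l.map f := by
  induction l with
  | nil => rfl
  | cons a t ih => simp [ih]

-- B's sweep is the flatMap of the columns
theorem pv_alt_eq_flatMap (xmin xmax ymin ymax : Int) :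
    (PySem.List.pyRange xmin (xmax + 1)).foldl
      (fun result x =>
        if x = xmin ∨ x = xmax then
          (PySem.List.pyRange ymin (ymax + 1)).foldl (fun r y => r ++ [(x, y)]) result
        else
          let r := result ++ [(x, ymin)]
          if ymax ≠ ymin then r ++ [(x, ymax)] else r)
      []
    = (PySem.List.pyRange xmin (xmax + 1)).flatMap (pvCol xmin xmax ymin ymax) := by
  have hbody : (fun (result : List (Int × Int)) (x : Int) =>
      if x = xmin ∨ x = xmax then
        (PySem.List.pyRange ymin (ymax + 1)).foldl (fun r y => r ++ [(x, y)]) result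
      else
        let r := result ++ [(x, ymin)]
        if ymax ≠ ymin then r ++ [(x, ymax)] else r)
      = fun result x => result ++ pvCol xmin xmax ymin ymax x := by
    funext result x
    unfold pvCol
    split_ifs with h1 h2
    · rw [PySem.List.foldl_append_eq_flatMap]
      simp only [List.flatMap, pv_flatten_singleton]
    · simp
    · simp
  rw [hbody, PySem.List.foldl_append_eq_flatMap]
  simp

-- the boundary predicate both programs compute
def pvBdry (xmin xmax ymin ymax : Int) (p : Int × Int) : Prop :=
  xmin ≤ p.1 ∧ p.1 ≤ xmax ∧ ymin ≤ p.2 ∧ p.2 ≤ ymax ∧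
    (p.1 = xmin ∨ p.1 = xmax ∨ p.2 = ymin ∨ p.2 = ymax)

theorem pv_mem_set_iff (xmin xmax ymin ymax : Int) (hx : xmin ≤ xmax) (hy : ymin ≤ ymax)
    (p : Int × Int) :
    p ∈ (PySem.List.pyRange ymin (ymax + 1)).foldl
          (fun s y => PySem.Set.add (PySem.Set.add s (xmin, y)) (xmax, y))
          ((PySem.List.pyRange xmin (xmax + 1)).foldl
            (fun s x => PySem.Set.add (PySem.Set.add s (x, ymin)) (x, ymax))
            (PySem.Set.empty : PySem.Set (Int × Int)))
      ↔ pvBdry xmin xmax ymin ymax p := by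
  rw [pv_mem_addloop, pv_mem_addloop]
  obtain ⟨px, py⟩ := p
  simp only [PySem.Set.empty, List.not_mem_nil, false_or, PySem.List.mem_pyRange_one,
    Prod.mk.injEq, pvBdry]
  constructor
  · rintro (⟨x, hxr, (⟨rfl, rfl⟩ | ⟨rfl, rfl⟩)⟩ | ⟨y, hyr, (⟨rfl, rfl⟩ | ⟨rfl, rfl⟩)⟩) <;>
      simp <;> omega
  · rintro ⟨h1, h2, h3, h4, h5⟩
    by_cases hbot : py = ymin
    · exact Or.inl ⟨px, by omega, Or.inl ⟨rfl, hbot⟩⟩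
    · by_cases htop : py = ymax
      · exact Or.inl ⟨px, by omega, Or.inr ⟨rfl, htop⟩⟩
      · rcases h5 with h5 | h5 | h5 | h5
        · exact Or.inr ⟨py, by omega, Or.inl ⟨h5, rfl⟩⟩
        · exact Or.inr ⟨py, by omega, Or.inr ⟨h5, rfl⟩⟩
        · exact absurd h5 hbot
        · exact absurd h5 htop

theorem pv_mem_blist_iff (xmin xmax ymin ymax : Int) (_hx : xmin ≤ xmax) (hy : ymin ≤ ymax)
    (p : Int × Int) :
    p ∈ (PySem.List.pyRange xmin (xmax + 1)).flatMap (pvCol xmin xmax ymin ymax)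
      ↔ pvBdry xmin xmax ymin ymax p := by
  obtain ⟨px, py⟩ := p
  simp only [List.mem_flatMap, PySem.List.mem_pyRange_one]
  constructor
  · rintro ⟨x, hxr, hmem⟩
    have hfst : px = x := congrArg Prod.fst (show ((px, py) : Int × Int) = (x, ((px, py) : Int × Int).2) from by
      have := pv_fst_of_mem_col hmem; exact Prod.ext this rfl)
    subst hfst
    unfold pvCol at hmem
    split_ifs at hmem with h1 h2 <;> simp [PySem.List.mem_pyRange_one] at hmem
    · obtain ⟨hy1, hy2⟩ := hmem
      exact ⟨by omega, by omega, by omega, by omega, by omega⟩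
    · rcases hmem with rfl | rfl <;> exact ⟨by omega, by omega, by omega, by omega, by omega⟩
    · subst hmem
      exact ⟨by omega, by omega, by omega, by omega, by omega⟩
  · rintro ⟨h1, h2, h3, h4, h5⟩
    refine ⟨px, by omega, ?_⟩
    unfold pvCol
    split_ifs with hEdge hNe
    · simp [PySem.List.mem_pyRange_one]; omega
    · have : py = ymin ∨ py = ymax := by tauto
      rcases this with rfl | rfl <;> simp
    · have : py = ymin := by omega
      simp [this]

theorem pv_pairwise_blist (xmin xmax ymin ymax : Int) (hy : ymin ≤ ymax) :
    ((PySem.List.pyRange xmin (xmax + 1)).flatMap (pvCol xmin xmax ymin ymax)).Pairwise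
      (fun p q => toLex p < toLex q) := by
  rw [List.pairwise_flatMap]
  constructor
  · intro x _
    unfold pvCol
    split_ifs with h1 h2
    · refine List.Pairwise.map _ ?_ (PySem.List.pairwise_lt_pyRange_one ymin (ymax + 1))
      intro a b hab
      exact Prod.Lex.toLex_lt_toLex.mpr (Or.inr ⟨rfl, hab⟩)
    · have : ymin < ymax := lt_of_le_of_ne hy (Ne.symm h2)
      simp [Prod.Lex.toLex_lt_toLex, this]
    · simp
  · refine (PySem.List.pairwise_lt_pyRange_one xmin (xmax + 1)).imp ?_
    intro x1 x2 h12 p hp q hq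
    refine Prod.Lex.toLex_lt_toLex.mpr (Or.inl ?_)
    rw [pv_fst_of_mem_col hp, pv_fst_of_mem_col hq]
    exact h12

theorem pv_nodup_blist (xmin xmax ymin ymax : Int) (hy : ymin ≤ ymax) :
    ((PySem.List.pyRange xmin (xmax + 1)).flatMap (pvCol xmin xmax ymin ymax)).Nodup := by
  refine (pv_pairwise_blist xmin xmax ymin ymax hy).imp ?_
  intro p q hlt rfl
  exact lt_irrefl _ hlt

-- the core identity, for normalised corners
theorem pv_key (xmin xmax ymin ymax : Int) (hx : xmin ≤ xmax) (hy : ymin ≤ ymax) :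
    PySem.List.sorted
      ((PySem.List.pyRange ymin (ymax + 1)).foldl
        (fun s y => PySem.Set.add (PySem.Set.add s (xmin, y)) (xmax, y))
        ((PySem.List.pyRange xmin (xmax + 1)).foldl
          (fun s x => PySem.Set.add (PySem.Set.add s (x, ymin)) (x, ymax))
          (PySem.Set.empty : PySem.Set (Int × Int))))
      (fun p => toLex p)
    = (PySem.List.pyRange xmin (xmax + 1)).flatMap (pvCol xmin xmax ymin ymax) := by
  apply PySem.List.sorted_eq_of_perm_of_pairwise_lt
  · rw [List.perm_ext_iff_of_nodup (pv_nodup_blist xmin xmax ymin ymax hy)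
      (pv_nodup_addloop _ _ _ _ (pv_nodup_addloop _ _ _ _ (by simp [PySem.Set.empty])))]
    intro p
    rw [pv_mem_blist_iff xmin xmax ymin ymax hx hy, pv_mem_set_iff xmin xmax ymin ymax hx hy]
  · exact pv_pairwise_blist xmin xmax ymin ymax hy

-- ===== VERDICT (by name: the statement is the Claim_ definition above) =====
theorem rectangle_boundary_points_spec : Claim_equal_rectangle_boundary_points := by
  intro A B _
  unfold Spec_rectangle_boundary_points rectangle_boundary_points rectangle_boundary_points_alt
  rw [pv_sorted_pair, pv_sorted_pair]
  simp only [← min_def, ← max_def]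
  rw [pv_alt_eq_flatMap]
  exact pv_key (min A.1 B.1) (max A.1 B.1) (min A.2 B.2) (max A.2 B.2)
    (min_le_max) (min_le_max)
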